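-- pv_equiv track=rewrite | github.com/OjeabuluFaith/algorithm-challenge | censored string.py | uncensor
-- ===== SOURCE A (Python) =====
-- def uncensor(string, vowels):
--     new_ = ""
--     counter = 0
--     for i in range(len(string)):
--         if string[i] == "*":
--             new_ += vowels[counter]
--             counter += 1
--         else:
--             new_ += string[i]
--     return new_
-- ===== SOURCE B (Python) =====
-- def uncensor(string, vowels):
--     parts = string.split('*')
--     out = [parts[0]]
--     for v, p in zip(vowels, parts[1:]):
--         out.append(v)
--         out.append(p)
--     return ''.join(out)
-- ===== Notes on version B (the rewrite author's own statement) =====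
-- stated objective: faster
-- what changed: B splits the string on '*' once and interleaves the segments with the vowels via zip/join, instead of A's character-by-character index loop with a running vowel counter and string concatenation.
-- outside the precondition, e.g. on uncensor('*a*', 'e'): A raises IndexError, B returns 'ea'
import Mathlib
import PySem

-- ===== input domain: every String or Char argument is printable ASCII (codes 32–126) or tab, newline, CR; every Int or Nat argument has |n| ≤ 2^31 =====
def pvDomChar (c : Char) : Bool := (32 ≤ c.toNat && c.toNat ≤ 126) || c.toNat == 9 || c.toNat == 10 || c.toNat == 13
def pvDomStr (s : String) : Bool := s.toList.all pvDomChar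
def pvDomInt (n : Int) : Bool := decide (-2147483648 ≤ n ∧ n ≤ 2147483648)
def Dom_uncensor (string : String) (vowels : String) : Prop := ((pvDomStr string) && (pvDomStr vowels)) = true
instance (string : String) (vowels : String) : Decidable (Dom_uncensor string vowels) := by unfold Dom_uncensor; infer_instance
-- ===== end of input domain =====

-- B splits the string on '*' once and interleaves segments with the vowels (zip/join) instead of A's per-character index loop with a vowel counter; measurably faster by constant factor (C-level split/join).


-- ===== PORT A =====
def uncensor (string : String) (vowels : String) : String :=
  let s := string.toList
  let v := vowels.toList
  let r := (PySem.List.pyRange 0 (s.length : Int) 1).foldl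
    (fun (st : List Char × Int) i =>
      let c := PySem.List.pyGetD s i ' '
      if c = '*' then (st.1 ++ [PySem.List.pyGetD v st.2 ' '], st.2 + 1)
      else (st.1 ++ [c], st.2))
    (([] : List Char), (0 : Int))
  String.mk r.1

-- ===== PORT B =====
def uncensor_alt (string : String) (vowels : String) : String :=
  let parts := PySem.Chars.splitOn string.toList ['*']
  let out := (List.zip vowels.toList (PySem.List.slice parts (some 1) none)).foldl
    (fun (acc : List (List Char)) pr => (acc ++ [[pr.1]]) ++ [pr.2])
    [PySem.List.pyGetD parts 0 []]
  String.mk (PySem.Chars.join [] out)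

-- ===== PRECONDITION & SPEC =====
-- Pre_ excludes exactly the inputs where A raises IndexError: more '*' in string than characters in vowels.
def Pre_uncensor (string : String) (vowels : String) : Prop :=
  string.toList.count '*' ≤ vowels.toList.length
instance (string : String) (vowels : String) : Decidable (Pre_uncensor string vowels) := by
  unfold Pre_uncensor; infer_instance
def pvWitness_uncensor : String × String := ("a*c*d", "eo")

def Spec_uncensor (string : String) (vowels : String) (out : String) : Prop := out = uncensor_alt string vowels
instance (string : String) (vowels : String) (out : String) : Decidable (Spec_uncensor string vowels out) := by unfold Spec_uncensor; infer_instance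

-- ===== CLAIM (what is proved, stated in full; the proofs are below) =====
def Claim_equal_uncensor : Prop := ∀ (string : String) (vowels : String), Dom_uncensor string vowels → Pre_uncensor string vowels → Spec_uncensor string vowels (uncensor string vowels)

-- ===== LEMMAS AND PROOFS =====

def pvAgo : List Char → List Char → List Char
  | [], _ => []
  | c :: r, vs => if c = '*' then vs.headD ' ' :: pvAgo r vs.tail else c :: pvAgo r vs

theorem pvA_fold (v : List Char) (s : List Char) (acc : List Char) (k : Nat)
    (h : s.count '*' + k ≤ v.length) :
    (s.foldl (fun (st : List Char × Int) c =>
        if c = '*' then (st.1 ++ [PySem.List.pyGetD v st.2 ' '], st.2 + 1)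
        else (st.1 ++ [c], st.2)) (acc, (k : Int))).1
      = acc ++ pvAgo s (v.drop k) := by
  induction s generalizing acc k with
  | nil => simp [pvAgo]
  | cons c r ih =>
    by_cases hc : c = '*'
    · subst hc
      simp only [List.count_cons, if_pos rfl] at h
      have hk : k < v.length := by simp at h; omega
      have hdrop : v.drop k = v[k] :: v.drop (k+1) := List.drop_eq_getElem_cons hk
      simp only [List.foldl_cons, if_pos rfl, if_true, decide_true, ite_true]
      have : (k : Int) + 1 = ((k+1 : Nat) : Int) := by push_cast; ring
      
      rw [this, PySem.List.pyGetD_natCast, ih (acc ++ [v.getD k ' ']) (k+1) (by simp at h ⊢; omega)]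
      rw [hdrop]
      simp [pvAgo, List.getD_eq_getElem _ _ hk]
    · simp only [List.count_cons, if_neg hc] at h
      simp only [List.foldl_cons, if_neg hc]
      rw [ih (acc ++ [c]) k (by simp [hc] at h; omega)]
      simp [pvAgo, hc]

def pvSplitStar : List Char → List (List Char)
  | [] => [[]]
  | c :: r => if c = '*' then [] :: pvSplitStar r else (pvSplitStar r).modifyHead (c :: ·)

def pvInterleave : List Char → List (List Char) → List Char
  | w :: vs, p :: ps => w :: (p ++ pvInterleave vs ps)
  | _, _ => []

theorem pvSplitStar_ne_nil (s : List Char) : pvSplitStar s ≠ [] := by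
  cases s with
  | nil => simp [pvSplitStar]
  | cons c r =>
    simp only [pvSplitStar]
    split_ifs
    · simp
    · cases h : pvSplitStar r with
      | nil => exact absurd h (pvSplitStar_ne_nil r)
      | cons q qs => simp [List.modifyHead]

theorem pvJoinNil (a : List (List Char)) : PySem.Chars.join [] a = a.flatten := by
  induction a with
  | nil => rfl
  | cons x xs ih =>
    cases xs with
    | nil => simp [PySem.Chars.join, List.intercalate]
    | cons y ys =>
      simp [PySem.Chars.join, List.intercalate, List.intersperse] at ih ⊢
      simpa using ih

theorem pvB_join (zs : List (Char × List Char)) (init : List (List Char)) :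
    PySem.Chars.join [] (zs.foldl (fun (a : List (List Char)) pr => (a ++ [[pr.1]]) ++ [pr.2]) init)
      = PySem.Chars.join [] init ++ zs.flatMap (fun pr => pr.1 :: pr.2) := by
  induction zs generalizing init with
  | nil => simp
  | cons z zs ih =>
    rw [List.foldl_cons, ih]
    simp [pvJoinNil]

theorem pvInterleave_eq (vs : List Char) (ps : List (List Char)) :
    (List.zip vs ps).flatMap (fun pr => pr.1 :: pr.2) = pvInterleave vs ps := by
  induction vs generalizing ps with
  | nil => simp [pvInterleave]
  | cons w vs ih =>
    cases ps with
    | nil => simp [pvInterleave]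
    | cons p ps => simp [List.zip_cons_cons, pvInterleave, ih]

theorem pv_main (s vs : List Char) (h : s.count '*' ≤ vs.length) :
    (pvSplitStar s).headD [] ++ pvInterleave vs (pvSplitStar s).tail = pvAgo s vs := by
  induction s generalizing vs with
  | nil => simp [pvSplitStar, pvAgo, pvInterleave]
  | cons c r ih =>
    by_cases hc : c = '*'
    · subst hc
      simp only [List.count_cons, if_pos rfl] at h
      cases vs with
      | nil => simp at h
      | cons w vs' =>
        cases hq : pvSplitStar r with
        | nil => exact absurd hq (pvSplitStar_ne_nil r)
        | cons q qs =>
          have hthis := ih vs' (by simp at h; omega)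
          rw [hq] at hthis
          simp only [List.headD_cons, List.tail_cons] at hthis
          simp only [pvSplitStar, hq, pvAgo, if_true, ite_true, decide_true, List.headD_cons, List.tail_cons, pvInterleave, List.nil_append]
          rw [hthis]
    · cases hq : pvSplitStar r with
      | nil => exact absurd hq (pvSplitStar_ne_nil r)
      | cons q qs =>
        have hthis := ih vs (by simp [hc] at h ⊢; omega)
        rw [hq] at hthis
        simp only [List.headD_cons, List.tail_cons] at hthis
        simp only [pvSplitStar, if_neg hc, hq, List.modifyHead, List.headD_cons,
          List.tail_cons, pvAgo, if_neg hc]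
        rw [List.cons_append, hthis]

-- structural model of string.split('*')  (already defined above as pvSplitStar)
theorem pv_go_split (fuel : Nat) (l cur : List Char) (acc : List (List Char)) (hf : l.length < fuel) :
    PySem.Chars.splitOn.go ['*'] fuel l cur acc
      = acc.reverse ++ ((pvSplitStar l).modifyHead (cur.reverse ++ ·)) := by
  induction fuel generalizing l cur acc with
  | zero => omega
  | succ fuel ih =>
    cases l with
    | nil =>
      rw [PySem.Chars.splitOn.go]
      · simp [pvSplitStar, List.modifyHead]
      · omega
    | cons c rest =>
      rw [PySem.Chars.splitOn.go]
      by_cases hc : c = '*'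
      · subst hc
        have hp : List.isPrefixOf ['*'] ('*' :: rest) = true := by
          simp [List.isPrefixOf]
        rw [if_pos hp]
        simp only [List.length_cons, List.length_nil, List.drop_succ_cons, List.drop_zero] at hf ⊢
        rw [ih _ _ _ (by omega)]
        cases hq : pvSplitStar rest with
        | nil => exact absurd hq (pvSplitStar_ne_nil rest)
        | cons q qs => simp [pvSplitStar, hq, List.modifyHead]
      · have hp : List.isPrefixOf ['*'] (c :: rest) = false := by
          simp [List.isPrefixOf, Ne.symm hc]
        rw [if_neg (by simp [hp])]
        simp only [List.length_cons] at hf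
        rw [ih _ _ _ (by omega)]
        cases hq : pvSplitStar rest with
        | nil => exact absurd hq (pvSplitStar_ne_nil rest)
        | cons q qs => simp [pvSplitStar, hc, hq, List.modifyHead]

theorem pv_splitOn_eq (s : List Char) : PySem.Chars.splitOn s ['*'] = pvSplitStar s := by
  unfold PySem.Chars.splitOn
  rw [pv_go_split (s.length + 1) s [] [] (by omega)]
  cases hq : pvSplitStar s with
  | nil => exact absurd hq (pvSplitStar_ne_nil s)
  | cons q qs => simp [List.modifyHead]

-- ===== VERDICT (by name: the statement is the Claim_ definition above) =====
theorem uncensor_spec : Claim_equal_uncensor := by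
  intro string vowels _ hpre
  unfold Spec_uncensor uncensor uncensor_alt
  have hA := PySem.List.foldl_pyRange_zero_pyGetD' string.toList ' '
    (fun (st : List Char × Int) c =>
      if c = '*' then (st.1 ++ [PySem.List.pyGetD vowels.toList st.2 ' '], st.2 + 1)
      else (st.1 ++ [c], st.2)) (([] : List Char), (0 : Int))
  simp only []
  rw [hA]
  have h0 : ((0 : Int)) = ((0 : Nat) : Int) := by norm_num
  rw [h0, pvA_fold vowels.toList string.toList [] 0 (by simpa using hpre)]
  rw [pv_splitOn_eq, PySem.List.slice_from_one, pvB_join, pvInterleave_eq]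
  cases hq : pvSplitStar string.toList with
  | nil => exact absurd hq (pvSplitStar_ne_nil string.toList)
  | cons q qs =>
    have := pv_main string.toList vowels.toList hpre
    rw [hq] at this
    simp only [List.headD_cons, List.tail_cons] at this
    simp [pvJoinNil, ← this]
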